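-- pv_equiv track=rewrite | github.com/lindsayjgc/investiCAT | cedar/main.py | _calculate_doc_date_range
-- ===== SOURCE A (Python) =====
-- from typing import Dict, List, Any, Optional
--
-- def _calculate_doc_date_range(timeline: List[Dict]) -> Dict[str, str]:
--     """Calculate date range for a document's timeline."""
--     dates = [event.get('date') for event in timeline if event.get('date')]
--     if not dates:
--         return {'start': None, 'end': None}
--
--     return {
--         'start': min(dates),
--         'end': max(dates)
--     }
-- ===== SOURCE B (Python) =====
-- from typing import Dict, List, Any, Optional
--
-- def _calculate_doc_date_range(timeline: List[Dict]) -> Dict[str, str]: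
--     """Calculate date range for a document's timeline in one explicit pass."""
--     lo = hi = None
--     for event in timeline:
--         d = event.get('date')
--         if not d:
--             continue
--         if lo is None:
--             lo = hi = d
--         else:
--             if d < lo:
--                 lo = d
--             if d > hi:
--                 hi = d
--     return {'start': lo, 'end': hi}
-- ===== Notes on version B (the rewrite author's own statement) =====
-- stated objective: alternative
-- what changed: Replaces the comprehension building a dates list plus two separate min/max scans with a single explicit loop that tracks the running lo/hi pair and allocates no intermediate list.
import Mathlib
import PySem

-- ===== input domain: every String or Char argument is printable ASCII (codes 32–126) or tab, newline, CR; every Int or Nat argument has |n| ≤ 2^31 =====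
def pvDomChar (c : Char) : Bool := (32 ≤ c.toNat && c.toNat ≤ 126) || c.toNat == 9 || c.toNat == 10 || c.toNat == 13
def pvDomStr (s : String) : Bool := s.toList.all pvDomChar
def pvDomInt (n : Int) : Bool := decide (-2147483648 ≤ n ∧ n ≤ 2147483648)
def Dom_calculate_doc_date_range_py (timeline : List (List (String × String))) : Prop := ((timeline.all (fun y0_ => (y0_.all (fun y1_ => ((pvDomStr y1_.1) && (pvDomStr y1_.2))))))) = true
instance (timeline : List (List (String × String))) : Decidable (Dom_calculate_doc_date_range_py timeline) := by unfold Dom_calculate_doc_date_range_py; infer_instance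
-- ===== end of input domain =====

-- B replaces A's dates-list comprehension plus separate min and max scans by one explicit
-- loop maintaining the running (lo, hi) pair; same O(n) cost, no intermediate list.

-- ===== PORT A =====
-- the comprehension [event.get('date') for event in timeline if event.get('date')]
-- (truthiness of an Optional[str]: not None and not the empty string)
def pvDatesA (timeline : List (List (String × String))) : List String :=
  timeline.filterMap (fun event =>
    match (PySem.Dict.mk event).get? "date" with
    | some d => if d = "" then none else some d
    | none => none)

def calculate_doc_date_range_py (timeline : List (List (String × String))) : List (String × Option String) :=
  let dates := pvDatesA timeline
  if dates = [] then [("start", none), ("end", none)]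
  else [("start", PySem.List.min? dates (fun x => x)), ("end", PySem.List.max? dates (fun x => x))]

-- ===== PORT B =====
-- one loop iteration: skip falsy event.get('date'), seed (lo, hi) on the first hit, else update
def pvAltStep (acc : Option (String × String)) (event : List (String × String)) : Option (String × String) :=
  match (PySem.Dict.mk event).get? "date" with
  | none => acc
  | some d =>
    if d = "" then acc
    else
      match acc with
      | none => some (d, d)
      | some (lo, hi) => some ((if d < lo then d else lo), (if hi < d then d else hi))

def calculate_doc_date_range_py_alt (timeline : List (List (String × String))) : List (String × Option String) :=
  match timeline.foldl pvAltStep none with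
  | none => [("start", none), ("end", none)]
  | some (lo, hi) => [("start", some lo), ("end", some hi)]

-- ===== PRECONDITION & SPEC =====
def Spec_calculate_doc_date_range_py (timeline : List (List (String × String))) (out : List (String × Option String)) : Prop := out = calculate_doc_date_range_py_alt timeline
instance (timeline : List (List (String × String))) (out : List (String × Option String)) : Decidable (Spec_calculate_doc_date_range_py timeline out) := by unfold Spec_calculate_doc_date_range_py; infer_instance

-- ===== CLAIM (what is proved, stated in full; the proofs are below) =====
def Claim_equal_calculate_doc_date_range_py : Prop := ∀ (timeline : List (List (String × String))), Dom_calculate_doc_date_range_py timeline → Spec_calculate_doc_date_range_py timeline (calculate_doc_date_range_py timeline)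

-- ===== LEMMAS AND PROOFS =====

theorem pvIfMin (a b : String) : (if b < a then b else a) = min a b := by
  rw [min_def]
  split_ifs with h1 h2 h3
  · exact absurd h2 (not_le.mpr h1)
  · rfl
  · rfl
  · exact absurd (not_le.mp h3) h1

theorem pvIfMax (a b : String) : (if a < b then b else a) = max a b := by
  rw [max_def]
  split_ifs with h1 h2 h3
  · rfl
  · exact absurd (le_of_lt h1) h2
  · exact le_antisymm h3 (not_lt.mp h1)
  · rfl

theorem pvFoldSome (timeline : List (List (String × String))) :
    ∀ lo hi, timeline.foldl pvAltStep (some (lo, hi)) =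
      some ((pvDatesA timeline).foldl min lo, (pvDatesA timeline).foldl max hi) := by
  induction timeline with
  | nil => intro lo hi; simp [pvDatesA]
  | cons e rest ih =>
    intro lo hi
    simp only [List.foldl_cons, pvDatesA, List.filterMap_cons]
    cases h : (PySem.Dict.mk e).get? "date" with
    | none => simp only [pvAltStep, h]; exact ih lo hi
    | some d =>
      by_cases hd : d = ""
      · simp only [pvAltStep, h, hd]; exact ih lo hi
      · simp only [pvAltStep, h, hd, List.foldl_cons, ↓reduceIte]
        rw [pvIfMin, pvIfMax]
        exact ih (min lo d) (max hi d)

theorem pvFoldNone (timeline : List (List (String × String))) :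
    timeline.foldl pvAltStep none =
      match pvDatesA timeline with
      | [] => none
      | d :: ds => some (ds.foldl min d, ds.foldl max d) := by
  induction timeline with
  | nil => simp [pvDatesA]
  | cons e rest ih =>
    simp only [List.foldl_cons, pvDatesA, List.filterMap_cons]
    cases h : (PySem.Dict.mk e).get? "date" with
    | none => simp only [pvAltStep, h]; exact ih
    | some d =>
      by_cases hd : d = ""
      · simp only [pvAltStep, h, hd]; exact ih
      · simp only [pvAltStep, h, hd, ↓reduceIte]
        exact pvFoldSome rest d d

-- ===== VERDICT (by name: the statement is the Claim_ definition above) =====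
theorem calculate_doc_date_range_py_spec : Claim_equal_calculate_doc_date_range_py := by
  intro timeline _
  unfold Spec_calculate_doc_date_range_py calculate_doc_date_range_py calculate_doc_date_range_py_alt
  rw [pvFoldNone]
  cases h : pvDatesA timeline with
  | nil => simp
  | cons d ds =>
    simp [PySem.List.min?_id_cons, PySem.List.max?_id_cons]
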